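-- pv_equiv track=rewrite | github.com/Bosbobos/Cryptography | Substitution.py | KeyByTextVigenereDecode
-- ===== SOURCE A (Python) =====
-- def KeyByTextVigenereDecode(alphabet, message, key):
--     m = len(alphabet)
--
--     code = ''
--     for i in range(len(message)):
--         kLetter = key[i] if len(key) > i else code[i - len(key)]
--         k = alphabet.index(kLetter)
--         x = alphabet.index(message[i])
--         y = (x - k) % m
--         code += alphabet[y]
--
--     return code
-- ===== SOURCE B (Python) =====
-- def KeyByTextVigenereDecode(alphabet, message, key):
--     m = len(alphabet)
--     if not message:
--         return ''
--     out = ''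
--     prev = key
--     for start in range(0, len(message), len(key)):
--         block = ''.join(alphabet[(alphabet.index(c) - alphabet.index(k)) % m]
--                         for c, k in zip(message[start:start + len(key)], prev))
--         out += block
--         prev = block
--     return out
-- ===== Notes on version B (the rewrite author's own statement) =====
-- stated objective: alternative
-- what changed: B decodes blockwise: it chunks the message into slices of key length and decodes each chunk by zipping it with the previous decoded chunk (the key for the first chunk), instead of A's per-index loop with a conditional between key letters and earlier output letters.
import Mathlib
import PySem

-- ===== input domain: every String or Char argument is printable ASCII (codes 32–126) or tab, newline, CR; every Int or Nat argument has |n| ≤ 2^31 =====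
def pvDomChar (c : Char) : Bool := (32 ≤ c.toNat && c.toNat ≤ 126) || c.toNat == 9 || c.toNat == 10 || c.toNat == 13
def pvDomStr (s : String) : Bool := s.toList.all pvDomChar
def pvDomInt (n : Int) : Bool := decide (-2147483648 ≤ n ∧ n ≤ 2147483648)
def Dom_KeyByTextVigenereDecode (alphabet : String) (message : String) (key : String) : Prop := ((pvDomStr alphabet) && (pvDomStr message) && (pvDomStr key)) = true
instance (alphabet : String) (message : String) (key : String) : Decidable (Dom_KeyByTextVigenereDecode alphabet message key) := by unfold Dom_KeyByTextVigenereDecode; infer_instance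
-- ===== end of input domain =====

-- B decodes blockwise (message chunks of key length, each zipped with the previous decoded
-- chunk, the key for the first) instead of A's per-index conditional loop (alternative).


-- ===== PORT A =====
def KeyByTextVigenereDecode (alphabet : String) (message : String) (key : String) : String :=
  String.mk ((PySem.List.pyRange 0 (PySem.List.len message.toList) 1).foldl
    (fun code i =>
      let kLetter := if PySem.List.len key.toList > i then PySem.List.pyGetD key.toList i ' '
                     else PySem.List.pyGetD code (i - PySem.List.len key.toList) ' '
      let k : Int := ((PySem.List.index? alphabet.toList kLetter).getD 0 : Nat)
      let x : Int := ((PySem.List.index? alphabet.toList (PySem.List.pyGetD message.toList i ' ')).getD 0 : Nat)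
      let y := PySem.Int.mod (x - k) (PySem.List.len alphabet.toList)
      code ++ [PySem.List.pyGetD alphabet.toList y ' '])
    [])

-- ===== PORT B =====
def KeyByTextVigenereDecode_alt (alphabet : String) (message : String) (key : String) : String :=
  if message.toList = [] then "" else
  String.mk ((PySem.List.pyRange 0 (PySem.List.len message.toList) (PySem.List.len key.toList)).foldl
    (fun (st : List Char × List Char) start =>
      let block := ((PySem.List.slice message.toList (some start) (some (start + PySem.List.len key.toList))).zip st.2).map
        (fun ck => PySem.List.pyGetD alphabet.toList
          (PySem.Int.mod ((((PySem.List.index? alphabet.toList ck.1).getD 0 : Nat) : Int) - (((PySem.List.index? alphabet.toList ck.2).getD 0 : Nat) : Int)) (PySem.List.len alphabet.toList)) ' ')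
      (st.1 ++ block, block))
    ([], key.toList)).1

-- ===== PRECONDITION & SPEC =====
-- Pre_ excludes exactly the inputs where Python A raises: a message character (or a used key
-- character) not in the alphabet (ValueError), and an empty key with a nonempty message (IndexError).
def Pre_KeyByTextVigenereDecode (alphabet : String) (message : String) (key : String) : Prop :=
  (message.toList = [] ∨ key.toList ≠ []) ∧
  message.toList.all (fun c => alphabet.toList.contains c) = true ∧
  (key.toList.take message.toList.length).all (fun c => alphabet.toList.contains c) = true
instance (alphabet : String) (message : String) (key : String) : Decidable (Pre_KeyByTextVigenereDecode alphabet message key) := by unfold Pre_KeyByTextVigenereDecode; infer_instance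
def pvWitness_KeyByTextVigenereDecode : String × String × String := ("abcd", "cab", "b")
def Spec_KeyByTextVigenereDecode (alphabet : String) (message : String) (key : String) (out : String) : Prop := out = KeyByTextVigenereDecode_alt alphabet message key
instance (alphabet : String) (message : String) (key : String) (out : String) : Decidable (Spec_KeyByTextVigenereDecode alphabet message key out) := by unfold Spec_KeyByTextVigenereDecode; infer_instance

-- ===== CLAIM (what is proved, stated in full; the proofs are below) =====
def Claim_equal_KeyByTextVigenereDecode : Prop := ∀ (alphabet : String) (message : String) (key : String), Dom_KeyByTextVigenereDecode alphabet message key → Pre_KeyByTextVigenereDecode alphabet message key → Spec_KeyByTextVigenereDecode alphabet message key (KeyByTextVigenereDecode alphabet message key)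

-- ===== LEMMAS AND PROOFS =====

-- the decode of one character against one keystream character (shared shape of both loop bodies)
def pvDec (al : List Char) (c kc : Char) : Char :=
  PySem.List.pyGetD al
    (PySem.Int.mod ((((PySem.List.index? al c).getD 0 : Nat) : Int) - (((PySem.List.index? al kc).getD 0 : Nat) : Int)) (PySem.List.len al)) ' '

-- proof-only copies of the two loop bodies (definitionally equal to the lambdas in the ports)
def pvStepA (al ms ks : List Char) (code : List Char) (i : Int) : List Char :=
  let kLetter := if PySem.List.len ks > i then PySem.List.pyGetD ks i ' '
                 else PySem.List.pyGetD code (i - PySem.List.len ks) ' '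
  code ++ [pvDec al (PySem.List.pyGetD ms i ' ') kLetter]

def pvStepB (al ms ks : List Char) (st : List Char × List Char) (start : Int) : List Char × List Char :=
  let block := ((PySem.List.slice ms (some start) (some (start + PySem.List.len ks))).zip st.2).map
    (fun ck => pvDec al ck.1 ck.2)
  (st.1 ++ block, block)

def pvCodeA (al ms ks : List Char) (j : Nat) : List Char :=
  (PySem.List.pyRange 0 (j : Int) 1).foldl (pvStepA al ms ks) []

lemma pvCodeA_succ (al ms ks : List Char) (j : Nat) :
    pvCodeA al ms ks (j + 1) = pvStepA al ms ks (pvCodeA al ms ks j) (j : Int) := by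
  unfold pvCodeA
  rw [show ((j + 1 : Nat) : Int) = (j : Int) + 1 by push_cast; ring,
      PySem.List.pyRange_one_succ_right (by positivity), List.foldl_append]
  simp

lemma pvCodeA_length (al ms ks : List Char) (j : Nat) :
    (pvCodeA al ms ks j).length = j := by
  induction j with
  | zero => simp [pvCodeA, PySem.List.pyRange_one_eq_nil]
  | succ j ih => rw [pvCodeA_succ]; simp [pvStepA, ih]

lemma pvCodeA_prefix (al ms ks : List Char) (j d : Nat) :
    (pvCodeA al ms ks (j + d)).take j = pvCodeA al ms ks j := by
  induction d with
  | zero =>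
      rw [Nat.add_zero]
      exact List.take_of_length_le (by rw [pvCodeA_length])
  | succ d ih =>
      rw [show j + (d + 1) = (j + d) + 1 by ring, pvCodeA_succ]
      unfold pvStepA
      rw [List.take_append_of_le_length (by rw [pvCodeA_length]; omega), ih]

-- front of the keystream = A's kLetter branch (when the code so far has length j)
lemma pv_kLetter_eq (ks c : List Char) (j : Nat) :
    PySem.List.pyGetD (ks ++ c) (j : Int) ' ' =
      if PySem.List.len ks > (j : Int) then PySem.List.pyGetD ks (j : Int) ' '
      else PySem.List.pyGetD c ((j : Int) - PySem.List.len ks) ' ' := by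
  simp only [PySem.List.pyGetD_natCast, PySem.List.len_eq]
  split_ifs with h
  · have hj : j < ks.length := by exact_mod_cast h
    simp [List.getD_eq_getElem?_getD, List.getElem?_append_left hj]
  · have hj : ks.length ≤ j := by omega
    rw [show (j : Int) - (ks.length : Int) = ((j - ks.length : Nat) : Int) by omega,
        PySem.List.pyGetD_natCast]
    simp [List.getD_eq_getElem?_getD, List.getElem?_append_right hj]

-- character-level description of A's full output
lemma pv_char (al ms ks : List Char) (hL : ks ≠ []) (i : Nat) (hi : i < ms.length) :
    (pvCodeA al ms ks ms.length)[i]? =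
      some (pvDec al (ms.getD i ' ') ((ks ++ pvCodeA al ms ks ms.length).getD i ' ')) := by
  have hks : 0 < ks.length := List.length_pos_iff.mpr hL
  set total := pvCodeA al ms ks ms.length with htotal
  have htake : total.take (i + 1) = pvCodeA al ms ks (i + 1) := by
    rw [htotal, show ms.length = (i + 1) + (ms.length - (i + 1)) by omega]
    exact pvCodeA_prefix al ms ks (i + 1) _
  have hpref : pvCodeA al ms ks i = total.take i := by
    rw [htotal, show ms.length = i + (ms.length - i) by omega]
    exact (pvCodeA_prefix al ms ks i _).symm
  have hsucc := pvCodeA_succ al ms ks i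
  rw [pvStepA] at hsucc
  rw [← pv_kLetter_eq ks (pvCodeA al ms ks i) i] at hsucc
  have hk1 : PySem.List.pyGetD (ks ++ pvCodeA al ms ks i) (i : Int) ' ' =
      (ks ++ total).getD i ' ' := by
    rw [PySem.List.pyGetD_natCast]
    simp only [List.getD_eq_getElem?_getD]
    congr 1
    rcases Nat.lt_or_ge i ks.length with h | h
    · rw [List.getElem?_append_left h, List.getElem?_append_left h]
    · rw [List.getElem?_append_right h, List.getElem?_append_right h,
          hpref, List.getElem?_take, if_pos (by omega)]
  have hm1 : PySem.List.pyGetD ms (i : Int) ' ' = ms.getD i ' ' :=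
    PySem.List.pyGetD_natCast ms i ' '
  rw [hk1, hm1] at hsucc
  have hlen := pvCodeA_length al ms ks i
  calc total[i]? = (total.take (i + 1))[i]? := by
        rw [List.getElem?_take, if_pos (by omega)]
    _ = some (pvDec al (ms.getD i ' ') ((ks ++ total).getD i ' ')) := by
        rw [htake, hsucc, List.getElem?_append_right (by omega)]
        simp [hlen]

-- cons form of range(a, b, s) for positive step
lemma pv_pyRange_pos_cons (a b s : Int) (hs : 0 < s) (hab : a < b) :
    PySem.List.pyRange a b s = a :: PySem.List.pyRange (a + s) b s := by
  rw [PySem.List.pyRange_of_pos _ _ hs, PySem.List.pyRange_of_pos _ _ hs, if_pos hab]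
  by_cases h : a + s < b
  · rw [if_pos h]
    have key : (b - a + s - 1) / s = (b - (a + s) + s - 1) / s + 1 := by
      have : b - a + s - 1 = (b - (a + s) + s - 1) + 1 * s := by ring
      rw [this, Int.add_mul_ediv_right _ _ (by omega)]
    have hnn : 0 ≤ (b - (a + s) + s - 1) / s := Int.ediv_nonneg (by omega) (by omega)
    rw [key, Int.toNat_add hnn (by norm_num), Int.toNat_one, List.range_succ_eq_map]
    simp only [List.map_cons, List.map_map]
    congr 1
    · simp
    · apply List.map_congr_left; intro k _; simp [Function.comp]; ring
  · rw [if_neg h]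
    have h1 : (b - a + s - 1) / s = 1 := by
      have hlo : 1 ≤ (b - a + s - 1) / s := Int.le_ediv_iff_mul_le hs |>.mpr (by omega)
      have hhi : (b - a + s - 1) / s < 2 := Int.ediv_lt_iff_lt_mul hs |>.mpr (by omega)
      omega
    rw [h1]
    simp

lemma pv_pyRange_pos_nil (a b s : Int) (hs : 0 < s) (hab : b ≤ a) :
    PySem.List.pyRange a b s = [] := by
  rw [PySem.List.pyRange_of_pos _ _ hs, if_neg (by omega)]
  simp

-- one block of B equals the corresponding slice of A's output
lemma pv_block (al ms ks : List Char) (hL : ks ≠ []) (s : Nat) (hs : s < ms.length) :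
    (((ms.drop s).take ks.length).zip (((ks ++ pvCodeA al ms ks ms.length).drop s).take ks.length)).map
        (fun ck => pvDec al ck.1 ck.2) =
      ((pvCodeA al ms ks ms.length).drop s).take ks.length := by
  have hks : 0 < ks.length := List.length_pos_of_ne_nil hL
  set total := pvCodeA al ms ks ms.length with htotal
  have htl : total.length = ms.length := by rw [htotal, pvCodeA_length]
  apply List.ext_getElem
  · simp [htl]; omega
  · intro j h1 h2
    simp only [List.getElem_map, List.getElem_zip, List.getElem_take, List.getElem_drop]
    have hj : s + j < ms.length := by
      simp [htl] at h2; omega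
    have hc := pv_char al ms ks hL (s + j) hj
    rw [← htotal] at hc
    rw [List.getElem?_eq_getElem (by omega : s + j < total.length)] at hc
    have hms : ms.getD (s + j) ' ' = ms[s + j] := List.getD_eq_getElem ms ' ' hj
    have hst : (ks ++ total).getD (s + j) ' ' =
        (ks ++ total)[s + j]'(by simp [htl]; omega) :=
      List.getD_eq_getElem (ks ++ total) ' ' (by simp [htl]; omega)
    rw [hms, hst] at hc
    exact (Option.some.inj hc).symm

-- the block fold invariant
lemma pv_blocks (al ms ks : List Char) (hL : ks ≠ []) (s : Nat) :
    ((PySem.List.pyRange (s : Int) (ms.length : Int) (ks.length : Int)).foldl (pvStepB al ms ks)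
      ((pvCodeA al ms ks ms.length).take s,
       (((ks ++ pvCodeA al ms ks ms.length).drop s).take ks.length))).1 =
      pvCodeA al ms ks ms.length := by
  have hks : 0 < ks.length := List.length_pos_of_ne_nil hL
  set total := pvCodeA al ms ks ms.length with htotal
  have htl : total.length = ms.length := by rw [htotal, pvCodeA_length]
  by_cases hs : s < ms.length
  · rw [pv_pyRange_pos_cons _ _ _ (by exact_mod_cast hks) (by exact_mod_cast hs)]
    rw [List.foldl_cons]
    have hstep : pvStepB al ms ks
        (total.take s, ((ks ++ total).drop s).take ks.length) (s : Int) =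
        (total.take (s + ks.length), ((ks ++ total).drop (s + ks.length)).take ks.length) := by
      unfold pvStepB
      have hsl : PySem.List.slice ms (some (s : Int)) (some ((s : Int) + PySem.List.len ks)) =
          (ms.drop s).take ks.length := by
        rw [PySem.List.len_eq, show ((s : Int) + (ks.length : Int)) = ((s + ks.length : Nat) : Int) by omega]
        rw [PySem.List.slice_natCast]
        congr 1
        omega
      rw [hsl]
      have hblk := pv_block al ms ks hL s hs
      rw [← htotal] at hblk
      simp only [hblk]
      simp only [Prod.mk.injEq]
      refine ⟨?_, ?_⟩
      · rw [← List.take_add]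
      · congr 1
        rw [List.drop_append, show s + ks.length - ks.length = s by omega,
            List.drop_of_length_le (show ks.length ≤ s + ks.length by omega)]
        simp
    rw [hstep,
        show ((s : Int) + (ks.length : Int)) = ((s + ks.length : Nat) : Int) by omega]
    exact pv_blocks al ms ks hL (s + ks.length)
  · rw [pv_pyRange_pos_nil _ _ _ (by exact_mod_cast hks) (by exact_mod_cast (by omega : ms.length ≤ s))]
    simp only [List.foldl_nil]
    exact List.take_of_length_le (by omega)
termination_by ms.length - s
decreasing_by omega

-- ===== VERDICT (by name: the statement is the Claim_ definition above) =====
theorem KeyByTextVigenereDecode_spec : Claim_equal_KeyByTextVigenereDecode := by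
  intro alphabet message key _ hpre
  unfold Spec_KeyByTextVigenereDecode KeyByTextVigenereDecode_alt
  by_cases hm : message.toList = []
  · rw [if_pos hm]
    show String.mk ((PySem.List.pyRange 0 (PySem.List.len message.toList) 1).foldl
        (pvStepA alphabet.toList message.toList key.toList) []) = ""
    rw [PySem.List.len_eq, hm]
    rfl
  · have hL : key.toList ≠ [] := by
      rcases hpre.1 with h | h
      · exact absurd h hm
      · exact h
    rw [if_neg hm]
    show String.mk ((PySem.List.pyRange 0 (PySem.List.len message.toList) 1).foldl
        (pvStepA alphabet.toList message.toList key.toList) []) =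
      String.mk (((PySem.List.pyRange 0 (PySem.List.len message.toList) (PySem.List.len key.toList)).foldl
        (pvStepB alphabet.toList message.toList key.toList) ([], key.toList)).1)
    have h0 := pv_blocks alphabet.toList message.toList key.toList hL 0
    simp only [Nat.cast_zero, List.take_zero, List.drop_zero] at h0
    have hkinit : (key.toList ++ pvCodeA alphabet.toList message.toList key.toList message.toList.length).take key.toList.length = key.toList := by
      rw [List.take_append, List.take_of_length_le (le_refl _ |>.trans (by omega)), Nat.sub_self,
          List.take_zero, List.append_nil]
    rw [hkinit] at h0
    rw [PySem.List.len_eq, PySem.List.len_eq, h0]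
    rfl
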